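-- pv_equiv track=rewrite | github.com/LouisChouraki/Guit2MIDI | inference_from_file.py | remove_simultaneous_onsets
-- ===== SOURCE A (Python) =====
-- def remove_simultaneous_onsets(onsets):
--     length = len(onsets)
--     i = 0
--     while i < length:
--         if onsets[i] == 0:
--             i += 1
--         else:
--             if i + 1 < length:
--                 onsets[i + 1] = 0
--             if i + 2 < length:
--                 onsets[i + 2] = 0
--             i += 4
--
--     return onsets
-- ===== SOURCE B (Python) =====
-- def remove_simultaneous_onsets(onsets):
--     # Pass 1: collect the trigger indices with the greedy stepping
--     # (a detected onset consumes the next 3 slots, so zeroed positions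
--     # are never read and trigger detection on the original values is exact).
--     n = len(onsets)
--     triggers = []
--     i = 0
--     while i < n:
--         if onsets[i] == 0:
--             i += 1
--         else:
--             triggers.append(i)
--             i += 4
--     # Pass 2: the set of positions to silence, applied in one comprehension.
--     kill = {j for t in triggers for j in (t + 1, t + 2)}
--     onsets[:] = [0 if j in kill else x for j, x in enumerate(onsets)]
--     return onsets
-- ===== Notes on version B (the rewrite author's own statement) =====
-- stated objective: alternative
-- what changed: B replaces A's fused scan-and-mutate loop by two staged passes: first collect the trigger indices, then build a kill set {t+1,t+2} and silence exactly those positions in a single comprehension spliced back into the argument.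
import Mathlib
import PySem

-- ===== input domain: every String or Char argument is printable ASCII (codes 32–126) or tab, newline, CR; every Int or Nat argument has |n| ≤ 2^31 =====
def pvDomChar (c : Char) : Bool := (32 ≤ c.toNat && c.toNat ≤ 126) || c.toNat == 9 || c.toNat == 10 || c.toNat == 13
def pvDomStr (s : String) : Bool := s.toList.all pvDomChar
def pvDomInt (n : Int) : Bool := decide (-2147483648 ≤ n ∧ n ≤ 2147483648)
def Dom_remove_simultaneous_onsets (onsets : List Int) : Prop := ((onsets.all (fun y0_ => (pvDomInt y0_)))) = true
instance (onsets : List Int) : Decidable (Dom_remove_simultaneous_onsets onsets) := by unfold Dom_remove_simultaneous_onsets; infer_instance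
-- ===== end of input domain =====

-- B replaces A's fused scan-and-mutate loop by two staged passes (collect trigger
-- indices, then silence the positions of a kill set {t+1,t+2} in one comprehension)
-- (objective: alternative); equivalence is about the return value (Python B splices
-- the result back into the argument list, so side effects match A's as well).


-- ===== PORT A =====
-- A's while loop: index i over the (length-preserved) list; Python's guarded writes
-- `if i+k < length: onsets[i+k] = 0` are exactly `List.set` (a no-op out of range).
def pvLoopA (onsets : List Int) (i : Nat) : List Int :=
  if h : i < onsets.length then
    if onsets[i] = 0 then pvLoopA onsets (i + 1)
    else pvLoopA ((onsets.set (i + 1) 0).set (i + 2) 0) (i + 4)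
  else onsets
termination_by onsets.length - i
decreasing_by all_goals (try simp only [List.length_set]); omega

def remove_simultaneous_onsets (onsets : List Int) : List Int := pvLoopA onsets 0

-- ===== PORT B =====
-- Source B pass 1: the while loop collecting trigger indices with the greedy stepping.
def pvTrigB (onsets : List Int) (i : Nat) : List Int :=
  if h : i < onsets.length then
    if onsets[i] = 0 then pvTrigB onsets (i + 1)
    else (i : Int) :: pvTrigB onsets (i + 4)
  else []
termination_by onsets.length - i

-- Source B pass 2: the kill set {j for t in triggers for j in (t+1, t+2)} and the
-- comprehension [0 if j in kill else x for j, x in enumerate(onsets)].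
def remove_simultaneous_onsets_alt (onsets : List Int) : List Int :=
  let triggers := pvTrigB onsets 0
  let kill := PySem.Set.ofList (triggers.flatMap (fun t => [t + 1, t + 2]))
  (PySem.List.enumerate onsets 0).map (fun p => if PySem.Set.contains kill p.1 then 0 else p.2)

-- ===== PRECONDITION & SPEC =====
def Spec_remove_simultaneous_onsets (onsets : List Int) (out : List Int) : Prop := out = remove_simultaneous_onsets_alt onsets
instance (onsets : List Int) (out : List Int) : Decidable (Spec_remove_simultaneous_onsets onsets out) := by unfold Spec_remove_simultaneous_onsets; infer_instance

-- ===== CLAIM (what is proved, stated in full; the proofs are below) =====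
def Claim_equal_remove_simultaneous_onsets : Prop := ∀ (onsets : List Int), Dom_remove_simultaneous_onsets onsets → Spec_remove_simultaneous_onsets onsets (remove_simultaneous_onsets onsets)

-- ===== LEMMAS AND PROOFS =====

-- proof-side characterisation: the value both versions compute on a suffix
def pvGo (xs : List Int) : List Int :=
  match xs with
  | [] => []
  | x :: rest =>
    if x = 0 then 0 :: pvGo rest
    else x :: (List.replicate (min 2 rest.length) 0 ++ (rest.drop 2).take 1 ++ pvGo (rest.drop 3))
termination_by xs.length
decreasing_by all_goals (simp only [List.length_cons, List.length_drop]; omega)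

-- the three cells A touches after a trigger, expressed block-wise
theorem take3_set (r : List Int) :
    ((r.take 3).set 0 0).set 1 0 = List.replicate (min 2 r.length) 0 ++ (r.drop 2).take 1 := by
  match r with
  | [] => simp
  | [a] => simp
  | [a, b] => simp [List.replicate]
  | a :: b :: c :: t => simp [List.replicate]

theorem loopA_eq (l : List Int) (i : Nat) :
    pvLoopA l i = l.take i ++ pvGo (l.drop i) := by
  fun_induction pvLoopA l i with
  | case1 l i h hz ih =>
    rw [ih, List.drop_eq_getElem_cons h, pvGo, if_pos hz,
        List.take_add_one, List.getElem?_eq_getElem h, hz]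
    simp
  | case2 l i h hz ih =>
    rw [ih]
    have hlen : (List.take i l).length = i := by simp; omega
    have hd : ((l.set (i + 1) 0).set (i + 2) 0).drop (i + 4) = l.drop (i + 4) := by
      rw [List.drop_set, if_pos (by omega), List.drop_set, if_pos (by omega)]
    have ht4 : l.take (i + 4) = l.take i ++ l[i] :: (l.drop (i + 1)).take 3 := by
      rw [List.take_add, List.drop_eq_getElem_cons h, List.take_succ_cons]
    have htk : ((l.set (i + 1) 0).set (i + 2) 0).take (i + 4)
        = l.take i ++ l[i] :: (((l.drop (i + 1)).take 3).set 0 0).set 1 0 := by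
      rw [List.take_set, List.take_set, ht4, List.set_append, if_neg (by omega),
          List.set_append, if_neg (by omega), hlen]
      have : i + 1 - i = 1 := by omega
      rw [this]
      have : i + 2 - i = 2 := by omega
      rw [this, List.set_cons_succ, List.set_cons_succ]
    rw [hd, htk, take3_set, List.drop_eq_getElem_cons h, pvGo, if_neg hz]
    simp [List.drop_drop]
  | case3 l i h =>
    simp [List.drop_eq_nil_of_le (le_of_not_gt h), List.take_of_length_le (le_of_not_gt h), pvGo]

-- B-side proof machinery: the kill list and the comprehension with a start offset
def pvKill (T : List Int) : List Int := T.flatMap (fun t => [t + 1, t + 2])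

def pvKM (K : List Int) (s : Int) (xs : List Int) : List Int :=
  (PySem.List.enumerate xs s).map (fun p => if PySem.Set.contains K p.1 then 0 else p.2)

theorem pvKM_nil (K : List Int) (s : Int) : pvKM K s [] = [] := by
  simp [pvKM, PySem.List.enumerate]

theorem pvKM_cons (K : List Int) (s : Int) (x : Int) (xs : List Int) :
    pvKM K s (x :: xs) = (if s ∈ K then 0 else x) :: pvKM K (s + 1) xs := by
  simp [pvKM, PySem.List.enumerate_cons, PySem.Set.contains]

theorem pvKM_congr (K K' : List Int) (xs : List Int) (s : Int)
    (h : ∀ j : Int, s ≤ j → (j ∈ K ↔ j ∈ K')) : pvKM K s xs = pvKM K' s xs := by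
  induction xs generalizing s with
  | nil => rw [pvKM_nil, pvKM_nil]
  | cons x xs ih =>
    rw [pvKM_cons, pvKM_cons, ih (s + 1) (fun j hj => h j (by omega))]
    by_cases hs : s ∈ K
    · rw [if_pos hs, if_pos ((h s le_rfl).mp hs)]
    · rw [if_neg hs, if_neg (fun hs' => hs ((h s le_rfl).mpr hs'))]

theorem trigB_lb (l : List Int) (i : Nat) : ∀ t ∈ pvTrigB l i, (i : Int) ≤ t := by
  fun_induction pvTrigB l i with
  | case1 i h hz ih =>
    intro t ht
    have := ih t ht
    omega
  | case2 i h hz ih =>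
    intro t ht
    rcases List.mem_cons.mp ht with rfl | ht
    · omega
    · have := ih t ht
      omega
  | case3 i h => simp

theorem mem_pvKill (T : List Int) (j : Int) :
    j ∈ pvKill T ↔ ∃ t ∈ T, j = t + 1 ∨ j = t + 2 := by
  simp [pvKill, List.mem_flatMap]

theorem loopB_eq (l : List Int) (i : Nat) :
    pvKM (pvKill (pvTrigB l i)) (i : Int) (l.drop i) = pvGo (l.drop i) := by
  fun_induction pvTrigB l i with
  | case1 i h hz ih =>
    rw [List.drop_eq_getElem_cons h, pvKM_cons, pvGo, if_pos hz, hz, ite_self]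
    have : (i : Int) + 1 = ((i + 1 : Nat) : Int) := by push_cast; ring
    rw [this, ih]
  | case2 i h hz ih =>
    have hdd : (l.drop (i + 1)).drop 3 = l.drop (i + 4) := by
      rw [List.drop_drop]
    have hKmem : ∀ j : Int, j ∈ pvKill ((i : Int) :: pvTrigB l (i + 4)) ↔
        (j = (i : Int) + 1 ∨ j = (i : Int) + 2 ∨ j ∈ pvKill (pvTrigB l (i + 4))) := by
      intro j
      constructor
      · intro hm
        rcases (mem_pvKill _ _).mp hm with ⟨t, ht, hj⟩
        rcases List.mem_cons.mp ht with rfl | ht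
        · tauto
        · exact Or.inr (Or.inr ((mem_pvKill _ _).mpr ⟨t, ht, hj⟩))
      · rintro (rfl | rfl | hm)
        · exact (mem_pvKill _ _).mpr ⟨i, List.mem_cons_self, by tauto⟩
        · exact (mem_pvKill _ _).mpr ⟨i, List.mem_cons_self, by tauto⟩
        · rcases (mem_pvKill _ _).mp hm with ⟨t, ht, hj⟩
          exact (mem_pvKill _ _).mpr ⟨t, List.mem_cons_of_mem _ ht, hj⟩
    have hlb : ∀ t ∈ pvTrigB l (i + 4), (i : Int) + 4 ≤ t := by
      intro t ht
      have := trigB_lb l (i + 4) t ht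
      omega
    have hKlb : ∀ j : Int, j ∈ pvKill (pvTrigB l (i + 4)) → (i : Int) + 5 ≤ j := by
      intro j hm
      rcases (mem_pvKill _ _).mp hm with ⟨t, ht, hj⟩
      have := hlb t ht
      omega
    set K : List Int := pvKill ((i : Int) :: pvTrigB l (i + 4)) with hK
    have hcongr : pvKM K ((i : Int) + 4) (l.drop (i + 4)) =
        pvKM (pvKill (pvTrigB l (i + 4))) ((i : Int) + 4) (l.drop (i + 4)) := by
      apply pvKM_congr
      intro j hj
      rw [hKmem j]
      constructor
      · rintro (rfl | rfl | hm)
        · omega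
        · omega
        · exact hm
      · intro hm; tauto
    have hiK : (i : Int) ∉ K := by
      rw [hKmem]
      rintro (h1 | h1 | hm)
      · omega
      · omega
      · have := hKlb _ hm; omega
    have h3K : (i : Int) + 3 ∉ K := by
      rw [hKmem]
      rintro (h1 | h1 | hm)
      · omega
      · omega
      · have := hKlb _ hm; omega
    have h1K : (i : Int) + 1 ∈ K := by rw [hKmem]; tauto
    have h2K : (i : Int) + 1 + 1 ∈ K := by rw [hKmem]; right; left; ring
    have hcast : (i : Int) + 4 = ((i + 4 : Nat) : Int) := by push_cast; ring
    rw [List.drop_eq_getElem_cons h, pvKM_cons, pvGo, if_neg hz, if_neg hiK]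
    congr 1
    cases hrest : l.drop (i + 1) with
    | nil =>
      have hd4 : l.drop (i + 4) = [] := by rw [← hdd, hrest]; rfl
      simp [pvKM_nil, pvGo]
    | cons a xs =>
      cases xs with
      | nil =>
        have hd4 : l.drop (i + 4) = [] := by rw [← hdd, hrest]; rfl
        rw [pvKM_cons, if_pos h1K, pvKM_nil]
        simp [pvGo]
      | cons b xs =>
        cases xs with
        | nil =>
          have hd4 : l.drop (i + 4) = [] := by rw [← hdd, hrest]; rfl
          rw [pvKM_cons, if_pos h1K, pvKM_cons, if_pos h2K, pvKM_nil]
          simp [pvGo, List.replicate]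
        | cons c t =>
          have hd4 : l.drop (i + 4) = t := by rw [← hdd, hrest]; rfl
          have h3 : (i : Int) + 1 + 1 + 1 = (i : Int) + 3 := by ring
          have h4 : (i : Int) + 3 + 1 = (i : Int) + 4 := by ring
          rw [hd4] at hcongr ih
          have hfin : pvKM K ((i : Int) + 4) t = pvGo t := by
            rw [hcongr, hcast]
            exact ih
          rw [pvKM_cons, if_pos h1K, pvKM_cons, if_pos h2K, pvKM_cons, h3,
              if_neg h3K, h4, hfin]
          simp [List.replicate]
  | case3 i h =>
    rw [List.drop_eq_nil_of_le (by omega), pvKM_nil, pvGo]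

theorem alt_eq_pvKM (onsets : List Int) :
    remove_simultaneous_onsets_alt onsets =
      pvKM (PySem.Set.ofList (pvKill (pvTrigB onsets 0))) 0 onsets := rfl

theorem pvKM_ofList (xs : List Int) (s : Int) (l : List Int) :
    pvKM (PySem.Set.ofList xs) s l = pvKM xs s l := by
  apply pvKM_congr
  intro j _
  exact PySem.Set.mem_ofList xs j

-- ===== VERDICT (by name: the statement is the Claim_ definition above) =====
theorem remove_simultaneous_onsets_spec : Claim_equal_remove_simultaneous_onsets := by
  intro onsets _
  unfold Spec_remove_simultaneous_onsets
  rw [alt_eq_pvKM, pvKM_ofList]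
  have hB := loopB_eq onsets 0
  have hA := loopA_eq onsets 0
  simp only [List.drop_zero, Nat.cast_zero] at hB hA
  rw [remove_simultaneous_onsets, hA, hB]
  simp
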